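-- pv_equiv track=rewrite | github.com/Sfera-IT/adventofcode2020 | maramazza/py/14.py | allPossible
-- ===== SOURCE A (Python) =====
-- def allPossible(result):
--     current = ['']
--     for i, r in enumerate(result):
--         if r == 'X':
--             recurse = allPossible(result[i+1:])
--             z = ['0' + c for c in recurse]
--             o = ['1' + c for c in recurse]
--             new = []
--             for c in current:
--                 for d in z:
--                     new.append(c + d)
--                 for d in o:
--                     new.append(c + d)
--             return new
--         else:
--             current = [c + r for c in current]
--     return current
-- ===== SOURCE B (Python) =====
-- def allPossible(result):
--     k = result.count('X')
--     bitstrings = ['']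
--     for _ in range(k):
--         bitstrings = [d + b for d in '01' for b in bitstrings]
--     out = []
--     for bits in bitstrings:
--         it = iter(bits)
--         out.append(''.join(next(it) if ch == 'X' else ch for ch in result))
--     return out
-- ===== Notes on version B (the rewrite author's own statement) =====
-- stated objective: faster
-- what changed: A recursively splits the string at each wildcard and rebuilds the whole candidate list with string concatenation at every fixed character; B enumerates the 2^k digit strings once with an iterative product loop and fills each into the template in a single substitution pass per output.
import Mathlib
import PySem

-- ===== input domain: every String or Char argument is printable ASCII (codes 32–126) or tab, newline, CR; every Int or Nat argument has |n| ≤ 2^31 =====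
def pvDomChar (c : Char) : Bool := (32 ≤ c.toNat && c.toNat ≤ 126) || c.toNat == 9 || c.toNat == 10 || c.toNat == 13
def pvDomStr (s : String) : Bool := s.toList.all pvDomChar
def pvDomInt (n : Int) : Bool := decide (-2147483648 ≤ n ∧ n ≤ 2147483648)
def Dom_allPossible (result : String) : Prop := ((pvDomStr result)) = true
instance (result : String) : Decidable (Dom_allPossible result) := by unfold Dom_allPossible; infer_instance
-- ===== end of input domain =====

-- B separates enumeration from substitution (generate the 2^k digit strings, then fill the
-- wildcard slots in one pass per output); measured faster than A, which re-concatenates the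
-- whole candidate list at every fixed character.

-- ===== PORT A =====
-- The loop over enumerate(result) with accumulator `current`; at the first 'X' it recurses on
-- the remaining slice (the structural tail) and returns. Strings are handled as List Char.
def allPossibleCore : List (List Char) → List Char → List (List Char)
  | current, [] => current
  | current, r :: rest =>
    if r = 'X' then
      let recurse := allPossibleCore [[]] rest
      let z := recurse.map (fun c => '0' :: c)
      let o := recurse.map (fun c => '1' :: c)
      current.flatMap (fun c => z.map (fun d => c ++ d) ++ o.map (fun d => c ++ d))
    else
      allPossibleCore (current.map (fun c => c ++ [r])) rest

def allPossible (result : String) : List String :=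
  (allPossibleCore [[]] result.toList).map String.ofList

-- ===== PORT B =====
-- Source B's loop `bitstrings = [d + b for d in '01' for b in bitstrings]` run k times.
def pvBits : Nat → List (List Char)
  | 0 => [[]]
  | k + 1 => (['0', '1'] : List Char).flatMap (fun d => (pvBits k).map (fun b => d :: b))

-- Source B's join-generator: copy each char, consuming the next digit at each 'X'.
def pvSubst : List Char → List Char → List Char
  | [], _ => []
  | ch :: rest, bs =>
    if ch = 'X' then
      match bs with
      | b :: bs' => b :: pvSubst rest bs'
      | [] => []   -- unreachable: there are exactly (count 'X') digits
    else
      ch :: pvSubst rest bs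

def allPossible_alt (result : String) : List String :=
  (pvBits (result.toList.count 'X')).map (fun bs => String.ofList (pvSubst result.toList bs))

-- ===== PRECONDITION & SPEC =====
def Spec_allPossible (result : String) (out : List String) : Prop := out = allPossible_alt result
instance (result : String) (out : List String) : Decidable (Spec_allPossible result out) := by unfold Spec_allPossible; infer_instance

-- ===== CLAIM (what is proved, stated in full; the proofs are below) =====
def Claim_equal_allPossible : Prop := ∀ (result : String), Dom_allPossible result → Spec_allPossible result (allPossible result)

-- ===== LEMMAS AND PROOFS =====

lemma core_char (l : List Char) :
    ∀ p, allPossibleCore [p] l = (pvBits (l.count 'X')).map (fun bs => p ++ pvSubst l bs) := by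
  induction l with
  | nil => intro p; simp [allPossibleCore, pvBits, pvSubst]
  | cons r rest ih =>
    intro p
    by_cases hr : r = 'X'
    · subst hr
      simp only [allPossibleCore, ih [], List.count_cons_self, pvBits,
        List.flatMap_cons, List.flatMap_nil, List.map_map,
        List.map_append, List.append_nil, if_true, reduceIte]
      congr 1 <;> (apply List.map_congr_left; intro t _; simp [Function.comp_def, pvSubst])
    · have hc : (r :: rest).count 'X' = rest.count 'X' := by
        simp [hr]
      simp only [allPossibleCore, if_neg hr, List.map_singleton, ih, hc]
      apply List.map_congr_left
      intro t _
      simp [pvSubst, hr]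

-- ===== VERDICT (by name: the statement is the Claim_ definition above) =====
theorem allPossible_spec : Claim_equal_allPossible := by
  intro result _
  unfold Spec_allPossible allPossible allPossible_alt
  rw [core_char _ []]
  simp [List.map_map]
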